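-- pv_equiv track=rewrite | github.com/raheb77/saudi-centric-dialect-classifier | src/baselines/llm_baseline.py | _coerce_label
-- ===== SOURCE A (Python) =====
-- def _coerce_label(value: str, label_order: tuple[str, ...]) -> str:
--     normalized = value.strip()
--     for label in label_order:
--         if normalized == label:
--             return label
--     lowered = normalized.lower()
--     for label in label_order:
--         if lowered == label.lower():
--             return label
--     for label in label_order:
--         if label.lower() in lowered:
--             return label
--     raise ValueError(f"Invalid label returned by model: `{value}`")
-- ===== SOURCE B (Python) =====
-- def _coerce_label(value: str, label_order: tuple[str, ...]) -> str:
--     normalized = value.strip()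
--     lowered = normalized.lower()
--     exact = None
--     ci = None
--     pairs = []
--     for label in label_order:
--         if label == normalized:
--             exact = label
--             break
--         ll = label.lower()
--         if ci is None and lowered == ll:
--             ci = label
--         pairs.append((label, ll))
--     if exact is not None:
--         return exact
--     if ci is not None:
--         return ci
--     for label, ll in pairs:
--         if ll in lowered:
--             return label
--     raise ValueError(f"Invalid label returned by model: `{value}`")
-- ===== Notes on version B (the rewrite author's own statement) =====
-- stated objective: alternative
-- what changed: Replaces A's three independent early-return scans by one early-breaking pass that simultaneously records the first exact and first case-insensitive match while caching each label's lowercase, plus a fallback substring scan over the cached (label, lowercase) pairs.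
import Mathlib
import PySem

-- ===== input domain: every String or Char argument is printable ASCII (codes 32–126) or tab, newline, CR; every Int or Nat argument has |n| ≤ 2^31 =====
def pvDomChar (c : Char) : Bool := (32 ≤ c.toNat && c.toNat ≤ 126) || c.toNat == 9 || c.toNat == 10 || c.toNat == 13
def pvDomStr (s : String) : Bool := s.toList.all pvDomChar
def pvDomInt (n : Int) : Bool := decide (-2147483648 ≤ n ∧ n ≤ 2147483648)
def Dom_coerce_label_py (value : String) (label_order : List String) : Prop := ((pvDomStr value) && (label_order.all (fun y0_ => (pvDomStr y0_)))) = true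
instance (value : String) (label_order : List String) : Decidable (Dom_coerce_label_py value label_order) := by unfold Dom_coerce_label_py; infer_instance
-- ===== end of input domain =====

-- B merges A's first two scans into one early-breaking pass that records the first exact and first
-- case-insensitive match and caches each label's lowercase for the fallback substring scan (alternative decomposition).

-- ===== PORT A =====
-- first label in the list satisfying p (the 'for … return label' loop of A)
def pvScanA (p : String → Bool) : List String → Option String
  | [] => none
  | l :: ls => if p l then some l else pvScanA p ls

def coerce_label_py (value : String) (label_order : List String) : String :=
  let normalized := PySem.Str.strip value
  match pvScanA (fun label => normalized == label) label_order with
  | some label => label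
  | none =>
    let lowered := PySem.Str.lower normalized
    match pvScanA (fun label => lowered == PySem.Str.lower label) label_order with
    | some label => label
    | none =>
      match pvScanA (fun label => PySem.Str.isIn (PySem.Str.lower label) lowered) label_order with
      | some label => label
      | none => ""   -- Python raises ValueError here; excluded by Pre_

-- ===== PORT B =====
-- the single early-breaking pass of B: returns (exact, ci, pairs) — the loop state at exit
def pvPass (normalized lowered : String) :
    List String → Option String → List (String × String) →
    Option String × Option String × List (String × String)
  | [], ci, pairs => (none, ci, pairs)
  | label :: ls, ci, pairs =>
    if label == normalized then (some label, ci, pairs)   -- break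
    else
      let ll := PySem.Str.lower label
      let ci' := if ci.isNone && (lowered == ll) then some label else ci
      pvPass normalized lowered ls ci' (pairs ++ [(label, ll)])

-- the fallback substring scan of B over the cached (label, lowercase) pairs
def pvScanPairs (lowered : String) : List (String × String) → Option String
  | [] => none
  | (label, ll) :: ps => if PySem.Str.isIn ll lowered then some label else pvScanPairs lowered ps

def coerce_label_py_alt (value : String) (label_order : List String) : String :=
  let normalized := PySem.Str.strip value
  let lowered := PySem.Str.lower normalized
  match pvPass normalized lowered label_order none [] with
  | (some exact, _, _) => exact
  | (none, some ci, _) => ci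
  | (none, none, pairs) =>
    match pvScanPairs lowered pairs with
    | some label => label
    | none => ""   -- Python raises ValueError here; excluded by Pre_

-- ===== PRECONDITION & SPEC =====
-- Pre_ excludes exactly the inputs on which A raises ValueError (no label matches exactly,
-- case-insensitively, or as a lowercase substring); B raises the same ValueError there.
def Pre_coerce_label_py (value : String) (label_order : List String) : Prop :=
  ∃ label ∈ label_order,
    (PySem.Str.strip value == label) = true ∨
    (PySem.Str.lower (PySem.Str.strip value) == PySem.Str.lower label) = true ∨
    (PySem.Str.isIn (PySem.Str.lower label) (PySem.Str.lower (PySem.Str.strip value))) = true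
instance (value : String) (label_order : List String) : Decidable (Pre_coerce_label_py value label_order) := by unfold Pre_coerce_label_py; infer_instance

def pvWitness_coerce_label_py : String × List String := (" MSA ", ["Gulf", "MSA"])

def Spec_coerce_label_py (value : String) (label_order : List String) (out : String) : Prop := out = coerce_label_py_alt value label_order
instance (value : String) (label_order : List String) (out : String) : Decidable (Spec_coerce_label_py value label_order out) := by unfold Spec_coerce_label_py; infer_instance

-- ===== CLAIM (what is proved, stated in full; the proofs are below) =====
def Claim_equal_coerce_label_py : Prop := ∀ (value : String) (label_order : List String), Dom_coerce_label_py value label_order → Pre_coerce_label_py value label_order → Spec_coerce_label_py value label_order (coerce_label_py value label_order)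

-- ===== LEMMAS AND PROOFS =====

lemma scan_congr (p q : String → Bool) (ls : List String)
    (h : ∀ l ∈ ls, p l = q l) : pvScanA p ls = pvScanA q ls := by
  induction ls with
  | nil => rfl
  | cons l ls ih =>
    simp only [pvScanA, h l (by simp)]
    split <;> [rfl; exact ih (fun x hx => h x (by simp [hx]))]

lemma scan_none_iff (p : String → Bool) (ls : List String) :
    pvScanA p ls = none ↔ ∀ l ∈ ls, p l = false := by
  induction ls with
  | nil => simp [pvScanA]
  | cons l ls ih =>
    by_cases h : p l = true
    · simp [pvScanA, h]
    · simp [pvScanA, h, ih]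

-- the exact component of the pass is the first exact match, independent of the carried state
lemma pass_fst (n lo : String) (ls : List String) (ci : Option String)
    (pairs : List (String × String)) :
    (pvPass n lo ls ci pairs).1 = pvScanA (fun l => l == n) ls := by
  induction ls generalizing ci pairs with
  | nil => rfl
  | cons l ls ih =>
    by_cases h : (l == n) = true
    · simp [pvPass, pvScanA, h]
    · simp [pvPass, pvScanA, h, ih]

-- when no exact match occurs, the pass runs to the end: ci becomes the first case-insensitive
-- match (if not already set) and pairs collects every label with its lowercase
lemma pass_no_exact (n lo : String) (ls : List String)
    (h : ∀ l ∈ ls, (l == n) = false) (ci : Option String) (pairs : List (String × String)) :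
    pvPass n lo ls ci pairs =
      (none,
       (match ci with
        | some c => some c
        | none => pvScanA (fun l => lo == PySem.Str.lower l) ls),
       pairs ++ ls.map (fun l => (l, PySem.Str.lower l))) := by
  induction ls generalizing ci pairs with
  | nil => cases ci <;> simp [pvPass, pvScanA]
  | cons l ls ih =>
    have hl : (l == n) = false := h l (by simp)
    have hrest : ∀ x ∈ ls, (x == n) = false := fun x hx => h x (by simp [hx])
    cases ci with
    | some c => simp [pvPass, hl, ih hrest]
    | none =>
      by_cases hlo : (lo == PySem.Str.lower l) = true
      · simp [pvPass, pvScanA, hl, hlo, ih hrest]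
      · simp [pvPass, pvScanA, hl, hlo, ih hrest]

-- the fallback scan over cached pairs is A's third scan
lemma scanPairs_eq (lo : String) (ls : List String) :
    pvScanPairs lo (ls.map (fun l => (l, PySem.Str.lower l))) =
      pvScanA (fun l => PySem.Str.isIn (PySem.Str.lower l) lo) ls := by
  induction ls with
  | nil => rfl
  | cons l ls ih =>
    cases hc : PySem.Chars.isIn (PySem.Chars.lower l.toList) lo.toList with
    | true => simp [pvScanPairs, pvScanA, hc]
    | false => simp [pvScanPairs, pvScanA, hc, ih]

-- the whole equality, with the two derived strings abstracted
lemma core (n : String) (ls : List String) :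
    (match pvScanA (fun label => n == label) ls with
     | some label => label
     | none =>
       match pvScanA (fun label => PySem.Str.lower n == PySem.Str.lower label) ls with
       | some label => label
       | none =>
         match pvScanA (fun label => PySem.Str.isIn (PySem.Str.lower label) (PySem.Str.lower n)) ls with
         | some label => label
         | none => "") =
    (match pvPass n (PySem.Str.lower n) ls none [] with
     | (some exact, _, _) => exact
     | (none, some ci, _) => ci
     | (none, none, pairs) =>
       match pvScanPairs (PySem.Str.lower n) pairs with
       | some label => label
       | none => "") := by
  have hsym : pvScanA (fun l => n == l) ls = pvScanA (fun l => l == n) ls :=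
    scan_congr _ _ _ (fun l _ => Bool.beq_comm)
  cases h0 : pvScanA (fun l => l == n) ls with
  | some e =>
    have hB := pass_fst n (PySem.Str.lower n) ls none []
    rw [h0] at hB
    rcases hP : pvPass n (PySem.Str.lower n) ls none [] with ⟨ex, ci, pairs⟩
    rw [hP] at hB
    simp only at hB
    rw [hsym, h0, hB]
  | none =>
    have h0' : ∀ l ∈ ls, (l == n) = false := (scan_none_iff _ _).mp h0
    rw [hsym, h0, pass_no_exact n (PySem.Str.lower n) ls h0' none []]
    cases h1 : pvScanA (fun l => PySem.Str.lower n == PySem.Str.lower l) ls with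
    | some c => simp
    | none => simp only [List.nil_append, scanPairs_eq]

-- ===== VERDICT (by name: the statement is the Claim_ definition above) =====
theorem coerce_label_py_spec : Claim_equal_coerce_label_py := by
  intro value label_order _ _
  exact core (PySem.Str.strip value) label_order
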